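-- pv_equiv track=rewrite | github.com/dryeab/competitive-programming | Leetcode/2420. Find All Good Indices.py | goodIndices
-- ===== SOURCE A (Python) =====
-- from typing import List
--
-- def goodIndices(nums: List[int], k: int) -> List[int]:
--
--     N = len(nums)
--
--     left = [1] * N
--     right = [1] * N
--
--     for i in range(1, N):
--         if nums[i - 1] >= nums[i]:
--             left[i] = left[i - 1] + 1
--
--     for i in range(N - 2, -1, -1):
--         if nums[i + 1] >= nums[i]:
--             right[i] = right[i + 1] + 1
--
--     res = []
--     for i in range(1, N - 1):
--         if left[i - 1] >= k and right[i + 1] >= k: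
--             res.append(i)
--
--     return res
-- ===== SOURCE B (Python) =====
-- from typing import List
--
-- def goodIndices(nums: List[int], k: int) -> List[int]:
--     n = len(nums)
--     left_ok = [False] * n
--     right_ok = [False] * n
--
--     # maximal non-increasing runs: split where nums[e-1] < nums[e]
--     s = 0
--     for e in range(1, n + 1):
--         if e == n or nums[e - 1] < nums[e]:
--             # run covers [s, e-1]; index j has non-increasing prefix length j - s + 1
--             for j in range(max(s + k - 1, s), e):
--                 left_ok[j] = True
--             s = e
--
--     # maximal non-decreasing runs: split where nums[e-1] > nums[e]
--     s = 0
--     for e in range(1, n + 1):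
--         if e == n or nums[e - 1] > nums[e]:
--             # run covers [s, e-1]; index j has non-decreasing suffix length e - j
--             for j in range(s, min(e - k + 1, e)):
--                 right_ok[j] = True
--             s = e
--
--     return [i for i in range(1, n - 1) if left_ok[i - 1] and right_ok[i + 1]]
-- ===== Notes on version B (the rewrite author's own statement) =====
-- stated objective: alternative
-- what changed: B partitions nums into maximal non-increasing and maximal non-decreasing runs and marks whole index ranges of each run as satisfying the k-threshold, instead of A's per-index left/right counter arrays.
import Mathlib
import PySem

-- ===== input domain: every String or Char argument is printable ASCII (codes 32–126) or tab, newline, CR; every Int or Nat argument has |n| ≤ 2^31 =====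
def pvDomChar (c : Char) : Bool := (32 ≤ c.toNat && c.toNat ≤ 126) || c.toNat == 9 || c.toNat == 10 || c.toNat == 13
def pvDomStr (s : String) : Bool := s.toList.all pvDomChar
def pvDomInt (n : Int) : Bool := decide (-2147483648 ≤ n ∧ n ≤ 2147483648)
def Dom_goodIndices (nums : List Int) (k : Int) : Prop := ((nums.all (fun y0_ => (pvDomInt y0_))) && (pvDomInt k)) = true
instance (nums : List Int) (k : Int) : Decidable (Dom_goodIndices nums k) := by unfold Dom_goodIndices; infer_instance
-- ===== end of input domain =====

-- B marks k-threshold index ranges run-by-run (maximal non-increasing / non-decreasing runs) instead of A's per-index counter arrays; objective: alternative decomposition, same cost.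


-- ===== PORT A =====
def goodIndices (nums : List Int) (k : Int) : List Int :=
  let N : Int := nums.length
  let left : List Int := (PySem.List.pyRange 1 N 1).foldl
    (fun left i =>
      if PySem.List.pyGetD nums (i - 1) 0 ≥ PySem.List.pyGetD nums i 0 then
        PySem.List.pySetD left i (PySem.List.pyGetD left (i - 1) 0 + 1)
      else left)
    (List.replicate nums.length (1 : Int))
  let right : List Int := (PySem.List.pyRange (N - 2) (-1) (-1)).foldl
    (fun right i =>
      if PySem.List.pyGetD nums (i + 1) 0 ≥ PySem.List.pyGetD nums i 0 then
        PySem.List.pySetD right i (PySem.List.pyGetD right (i + 1) 0 + 1)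
      else right)
    (List.replicate nums.length (1 : Int))
  (PySem.List.pyRange 1 (N - 1) 1).foldl
    (fun res i =>
      if PySem.List.pyGetD left (i - 1) 0 ≥ k ∧ PySem.List.pyGetD right (i + 1) 0 ≥ k then
        res ++ [i]
      else res) []

-- ===== PORT B =====
def goodIndices_alt (nums : List Int) (k : Int) : List Int :=
  let n : Int := nums.length
  -- maximal non-increasing runs: split where nums[e-1] < nums[e]
  let leftOk : List Bool := ((PySem.List.pyRange 1 (n + 1) 1).foldl
    (fun st e =>
      if e = n ∨ PySem.List.pyGetD nums (e - 1) 0 < PySem.List.pyGetD nums e 0 then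
        ((PySem.List.pyRange (max (st.2 + k - 1) st.2) e 1).foldl
           (fun ok j => PySem.List.pySetD ok j true) st.1, e)
      else st)
    (List.replicate nums.length false, (0 : Int))).1
  -- maximal non-decreasing runs: split where nums[e-1] > nums[e]
  let rightOk : List Bool := ((PySem.List.pyRange 1 (n + 1) 1).foldl
    (fun st e =>
      if e = n ∨ PySem.List.pyGetD nums e 0 < PySem.List.pyGetD nums (e - 1) 0 then
        ((PySem.List.pyRange st.2 (min (e - k + 1) e) 1).foldl
           (fun ok j => PySem.List.pySetD ok j true) st.1, e)
      else st)
    (List.replicate nums.length false, (0 : Int))).1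
  (PySem.List.pyRange 1 (n - 1) 1).filter
    (fun i => PySem.List.pyGetD leftOk (i - 1) false && PySem.List.pyGetD rightOk (i + 1) false)

-- ===== PRECONDITION & SPEC =====
def Spec_goodIndices (nums : List Int) (k : Int) (out : List Int) : Prop := out = goodIndices_alt nums k
instance (nums : List Int) (k : Int) (out : List Int) : Decidable (Spec_goodIndices nums k out) := by unfold Spec_goodIndices; infer_instance

-- ===== CLAIM (what is proved, stated in full; the proofs are below) =====
def Claim_equal_goodIndices : Prop := ∀ (nums : List Int) (k : Int), Dom_goodIndices nums k → Spec_goodIndices nums k (goodIndices nums k)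

-- ===== LEMMAS AND PROOFS =====


-- ===== proof-side helpers =====

-- length of the maximal non-increasing run of nums ending at index j
def runL (nums : List Int) : Nat → Int
  | 0 => 1
  | j+1 => if nums.getD (j+1) 0 ≤ nums.getD j 0 then runL nums j + 1 else 1

-- length of the maximal non-decreasing run of nums starting at index j
def runR (nums : List Int) (j : Nat) : Int :=
  if _h : j + 1 < nums.length then
    if nums.getD j 0 ≤ nums.getD (j+1) 0 then runR nums (j+1) + 1 else 1
  else 1
termination_by nums.length - j
decreasing_by omega

def stepLA (nums : List Int) : List Int → Int → List Int := fun left i =>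
  if PySem.List.pyGetD nums (i - 1) 0 ≥ PySem.List.pyGetD nums i 0 then
    PySem.List.pySetD left i (PySem.List.pyGetD left (i - 1) 0 + 1)
  else left

def stepRA (nums : List Int) : List Int → Int → List Int := fun right i =>
  if PySem.List.pyGetD nums (i + 1) 0 ≥ PySem.List.pyGetD nums i 0 then
    PySem.List.pySetD right i (PySem.List.pyGetD right (i + 1) 0 + 1)
  else right

def leftA (nums : List Int) : List Int :=
  (PySem.List.pyRange 1 (nums.length : Int) 1).foldl (stepLA nums) (List.replicate nums.length 1)

def rightA (nums : List Int) : List Int :=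
  (PySem.List.pyRange ((nums.length : Int) - 2) (-1) (-1)).foldl (stepRA nums) (List.replicate nums.length 1)

def stepLB (nums : List Int) (k : Int) : List Bool × Int → Int → List Bool × Int := fun st e =>
  if e = (nums.length : Int) ∨ PySem.List.pyGetD nums (e - 1) 0 < PySem.List.pyGetD nums e 0 then
    ((PySem.List.pyRange (max (st.2 + k - 1) st.2) e 1).foldl
       (fun ok j => PySem.List.pySetD ok j true) st.1, e)
  else st

def stepRB (nums : List Int) (k : Int) : List Bool × Int → Int → List Bool × Int := fun st e =>
  if e = (nums.length : Int) ∨ PySem.List.pyGetD nums e 0 < PySem.List.pyGetD nums (e - 1) 0 then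
    ((PySem.List.pyRange st.2 (min (e - k + 1) e) 1).foldl
       (fun ok j => PySem.List.pySetD ok j true) st.1, e)
  else st

def leftB (nums : List Int) (k : Int) : List Bool :=
  ((PySem.List.pyRange 1 ((nums.length : Int) + 1) 1).foldl (stepLB nums k)
    (List.replicate nums.length false, 0)).1

def rightB (nums : List Int) (k : Int) : List Bool :=
  ((PySem.List.pyRange 1 ((nums.length : Int) + 1) 1).foldl (stepRB nums k)
    (List.replicate nums.length false, 0)).1

lemma goodIndices_eq (nums : List Int) (k : Int) :
    goodIndices nums k = (PySem.List.pyRange 1 ((nums.length : Int) - 1) 1).foldl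
      (fun res i =>
        if PySem.List.pyGetD (leftA nums) (i - 1) 0 ≥ k ∧ PySem.List.pyGetD (rightA nums) (i + 1) 0 ≥ k then
          res ++ [i]
        else res) [] := rfl

lemma goodIndices_alt_eq (nums : List Int) (k : Int) :
    goodIndices_alt nums k = (PySem.List.pyRange 1 ((nums.length : Int) - 1) 1).filter
      (fun i => PySem.List.pyGetD (leftB nums k) (i - 1) false && PySem.List.pyGetD (rightB nums k) (i + 1) false) := rfl

lemma getD_set' {α : Type} (l : List α) (p j : Nat) (v d : α) :
    (l.set p v).getD j d = if p = j ∧ p < l.length then v else l.getD j d := by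
  simp only [List.getD, List.getElem?_set]
  split_ifs with h1 h2 h3 h3 <;> simp_all
  all_goals omega

lemma runL_succ (nums : List Int) (j : Nat) :
    runL nums (j+1) = if nums.getD (j+1) 0 ≤ nums.getD j 0 then runL nums j + 1 else 1 := rfl

lemma runR_pos (nums : List Int) (j : Nat) (h : j + 1 < nums.length) :
    runR nums j = if nums.getD j 0 ≤ nums.getD (j+1) 0 then runR nums (j+1) + 1 else 1 := by
  rw [runR, dif_pos h]

lemma runR_last (nums : List Int) (j : Nat) (h : ¬ (j + 1 < nums.length)) :
    runR nums j = 1 := by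
  rw [runR, dif_neg h]

-- the inner marking loop: length is preserved, and entry j becomes true exactly on [lo, hi)
lemma setRange_spec : ∀ (c : Nat) (lo hi : Int), 0 ≤ lo → (hi - lo).toNat = c → ∀ ok : List Bool,
    (((PySem.List.pyRange lo hi 1).foldl (fun ok j => PySem.List.pySetD ok j true) ok).length = ok.length) ∧
    (∀ j : Nat, ((PySem.List.pyRange lo hi 1).foldl (fun ok j => PySem.List.pySetD ok j true) ok).getD j false
       = (ok.getD j false || decide (lo ≤ (j : Int) ∧ (j : Int) < hi ∧ j < ok.length))) := by
  intro c
  induction c with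
  | zero =>
    intro lo hi h0 hc ok
    rw [PySem.List.pyRange_one_eq_nil (by omega)]
    constructor
    · rfl
    · intro j
      simp only [List.foldl_nil]
      have : ¬ (lo ≤ (j : Int) ∧ (j : Int) < hi ∧ j < ok.length) := by omega
      simp [this]
  | succ c ih =>
    intro lo hi h0 hc ok
    have hlt : lo < hi := by omega
    rw [PySem.List.pyRange_one_cons hlt]
    simp only [List.foldl_cons]
    rw [PySem.List.pySetD_of_nonneg ok true h0]
    obtain ⟨hlen, hget⟩ := ih (lo + 1) hi (by omega) (by omega) (ok.set lo.toNat true)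
    refine ⟨by rw [hlen]; simp, ?_⟩
    intro j
    rw [hget j]
    rw [getD_set' ok lo.toNat j true false]
    simp only [List.length_set]
    by_cases hA : lo.toNat = j ∧ lo.toNat < ok.length
    · have : (lo ≤ (j:Int) ∧ (j:Int) < hi ∧ j < ok.length) := by omega
      simp [hA, this]
    · rw [if_neg hA]
      have hA' : ¬((lo : Int) = (j : Int) ∧ j < ok.length) := fun ⟨x, y⟩ => hA ⟨by omega, by omega⟩
      congr 1
      rw [decide_eq_decide]
      omega
-- A's first loop builds the run lengths runL
lemma leftA_spec (nums : List Int) : ∀ (m : Nat), m ≤ nums.length →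
    ((PySem.List.pyRange 1 (m : Int) 1).foldl (stepLA nums) (List.replicate nums.length 1)).length = nums.length ∧
    (∀ j : Nat, j < nums.length →
      ((PySem.List.pyRange 1 (m : Int) 1).foldl (stepLA nums) (List.replicate nums.length 1)).getD j 0
       = if j < m then runL nums j else 1) := by
  intro m
  induction m with
  | zero =>
    intro _
    rw [PySem.List.pyRange_one_eq_nil (by omega)]
    refine ⟨by simp, ?_⟩
    intro j hj
    simp [List.getD, hj]
  | succ m ih =>
    intro hm
    obtain ⟨hlen, hget⟩ := ih (by omega)
    rcases Nat.eq_zero_or_pos m with h0 | hpos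
    · subst h0
      rw [show ((0 + 1 : Nat) : Int) = 1 by norm_num, PySem.List.pyRange_one_eq_nil (by omega)]
      refine ⟨by simp, ?_⟩
      intro j hj
      rcases Nat.eq_zero_or_pos j with rfl | hjp
      · simp [List.getD, hj, runL]
      · simp [List.getD, hj]
        omega
    · have hcast : ((m + 1 : Nat) : Int) = ((m : Nat) : Int) + 1 := by push_cast; ring
      rw [hcast, PySem.List.pyRange_one_succ_right (by omega), List.foldl_append, List.foldl_cons, List.foldl_nil]
      set prev := (PySem.List.pyRange 1 (m : Int) 1).foldl (stepLA nums) (List.replicate nums.length 1) with hprev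
      obtain ⟨m', rfl⟩ := Nat.exists_eq_add_of_le hpos
      have hm1 : ((1 + m' : Nat) : Int) - 1 = ((m' : Nat) : Int) := by push_cast; ring
      unfold stepLA
      rw [hm1, PySem.List.pyGetD_natCast, PySem.List.pyGetD_natCast, PySem.List.pyGetD_natCast]
      have hrunsucc : runL nums (m' + 1) = if nums.getD (m' + 1) 0 ≤ nums.getD m' 0 then runL nums m' + 1 else 1 := rfl
      have hprevm' : prev.getD m' 0 = runL nums m' := by
        rw [hget m' (by omega), if_pos (by omega)]
      have heq : (1 + m' : Nat) = m' + 1 := by omega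
      by_cases C : nums.getD (1 + m') 0 ≤ nums.getD m' 0
      · rw [if_pos C, PySem.List.pySetD_natCast, hprevm']
        refine ⟨by simp [hlen], ?_⟩
        intro j hj
        rw [getD_set' prev (1 + m') j (runL nums m' + 1) 0, hlen]
        by_cases hje : 1 + m' = j
        · subst hje
          rw [if_pos ⟨rfl, by omega⟩, if_pos (by omega), heq, hrunsucc,
            if_pos (heq ▸ C)]
        · rw [if_neg (by tauto), hget j hj]
          have : (j < 1 + m') ↔ (j < 1 + m' + 1) := by omega
          by_cases hjm : j < 1 + m' <;> simp [hjm] <;> omega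
      · rw [if_neg C]
        refine ⟨hlen, ?_⟩
        intro j hj
        rw [hget j hj]
        by_cases hje : j = 1 + m'
        · subst hje
          rw [if_neg (by omega), if_pos (by omega), heq, hrunsucc, if_neg (by rw [← heq]; exact C)]
        · have : (j < 1 + m') ↔ (j < 1 + m' + 1) := by omega
          by_cases hjm : j < 1 + m' <;> simp [hjm] <;> omega
-- A's second loop builds the run lengths runR
lemma rightA_spec (nums : List Int) : ∀ (c : Nat) (a : Int), a < (c : Int) → a ≤ (nums.length : Int) - 2 →
    ∀ init : List Int, init.length = nums.length →
    (∀ j : Nat, a < (j : Int) → j < nums.length → init.getD j 0 = runR nums j) →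
    (∀ j : Nat, (j : Int) ≤ a → init.getD j 0 = 1) →
    ((PySem.List.pyRange a (-1) (-1)).foldl (stepRA nums) init).length = nums.length ∧
    (∀ j : Nat, j < nums.length → ((PySem.List.pyRange a (-1) (-1)).foldl (stepRA nums) init).getD j 0 = runR nums j) := by
  intro c
  induction c with
  | zero =>
    intro a hc _ init hlen hhi _
    rw [PySem.List.pyRange_neg_one_eq_nil (by omega)]
    exact ⟨hlen, fun j hj => hhi j (by omega) hj⟩
  | succ c ih =>
    intro a hc ha init hlen hhi hlo
    by_cases hneg : a < 0
    · rw [PySem.List.pyRange_neg_one_eq_nil (by omega)]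
      exact ⟨hlen, fun j hj => hhi j (by omega) hj⟩
    · obtain ⟨an, rfl⟩ : ∃ an : Nat, a = (an : Int) := ⟨a.toNat, by omega⟩
      have han1 : an + 1 < nums.length := by omega
      rw [PySem.List.pyRange_neg_one_cons (by omega), List.foldl_cons]
      have hcast : ((an : Nat) : Int) + 1 = ((an + 1 : Nat) : Int) := by push_cast; ring
      unfold stepRA
      rw [hcast, PySem.List.pyGetD_natCast, PySem.List.pyGetD_natCast, PySem.List.pyGetD_natCast]
      have hinit1 : init.getD (an + 1) 0 = runR nums (an + 1) := hhi (an + 1) (by omega) han1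
      have hstep : ((an : Int) - 1) < (c : Int) := by omega
      by_cases C : nums.getD (an + 1) 0 ≥ nums.getD an 0
      · rw [if_pos C, PySem.List.pySetD_natCast, hinit1]
        apply ih ((an : Int) - 1) hstep (by omega)
        · simp [hlen]
        · intro j hja hj
          rw [getD_set' init an j (runR nums (an + 1) + 1) 0]
          by_cases hje : an = j
          · subst hje
            rw [if_pos ⟨rfl, by omega⟩, runR_pos nums an han1, if_pos C]
          · rw [if_neg (by tauto)]
            exact hhi j (by omega) hj
        · intro j hja
          rw [getD_set' init an j (runR nums (an + 1) + 1) 0, if_neg (by omega)]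
          exact hlo j (by omega)
      · rw [if_neg C]
        apply ih ((an : Int) - 1) hstep (by omega) init hlen
        · intro j hja hj
          by_cases hje : an = j
          · subst hje
            rw [runR_pos nums an han1, if_neg (by omega), hlo an le_rfl]
          · exact hhi j (by omega) hj
        · intro j hja
          exact hlo j (by omega)
lemma leftA_getD (nums : List Int) (j : Nat) (hj : j < nums.length) :
    (leftA nums).getD j 0 = runL nums j := by
  have h := leftA_spec nums nums.length le_rfl
  rw [leftA, h.2 j hj, if_pos hj]

lemma rightA_getD (nums : List Int) (j : Nat) (hj : j < nums.length) :
    (rightA nums).getD j 0 = runR nums j := by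
  have h := rightA_spec nums nums.length ((nums.length : Int) - 2) (by omega) (by omega)
    (List.replicate nums.length 1) (by simp) ?_ ?_
  · exact h.2 j hj
  · intro j' hj1 hj2
    have h1 : (List.replicate nums.length (1 : Int)).getD j' 0 = 1 := by
      simp only [List.getD, List.getElem?_replicate, if_pos hj2]
      rfl
    rw [h1, runR_last nums j' (by omega)]
  · intro j' hj'
    have hj2 : j' < nums.length := by omega
    simp only [List.getD, List.getElem?_replicate, if_pos hj2]
    rfl

-- B's first run loop: invariant over the processed prefix
lemma leftB_spec (nums : List Int) (k : Int) : ∀ (m : Nat), m ≤ nums.length →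
    ∃ t : Nat, t ≤ m ∧
    (((PySem.List.pyRange 1 ((m : Int) + 1) 1).foldl (stepLB nums k) (List.replicate nums.length false, 0)).2 = (t : Int)) ∧
    (((PySem.List.pyRange 1 ((m : Int) + 1) 1).foldl (stepLB nums k) (List.replicate nums.length false, 0)).1.length = nums.length) ∧
    (∀ j : Nat, ((PySem.List.pyRange 1 ((m : Int) + 1) 1).foldl (stepLB nums k) (List.replicate nums.length false, 0)).1.getD j false
       = decide (j < t ∧ k ≤ runL nums j)) ∧
    (m < nums.length → ∀ j : Nat, t ≤ j → j ≤ m → runL nums j = (j : Int) - (t : Int) + 1) ∧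
    (m = nums.length → t = m) := by
  intro m
  induction m with
  | zero =>
    intro _
    rw [show ((0 : Nat) : Int) + 1 = 1 by norm_num, PySem.List.pyRange_one_eq_nil (by omega)]
    refine ⟨0, le_rfl, rfl, by simp, ?_, ?_, fun h => by omega⟩
    · intro j
      simp only [List.foldl_nil]
      have h1 : (List.replicate nums.length false).getD j false = false := by
        simp [List.getD, List.getElem?_replicate]
        split_ifs <;> rfl
      rw [h1]
      simp
    · intro _ j h1 h2
      have : j = 0 := by omega
      subst this
      simp [runL]
  | succ m ih =>
    intro hm
    obtain ⟨t, htle, hsnd, hlen, hmark, hrun, hfin⟩ := ih (by omega)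
    have hmN : m < nums.length := by omega
    have hc1 : ((m + 1 : Nat) : Int) + 1 = ((m : Int) + 1) + 1 := by push_cast; ring
    rw [hc1, PySem.List.pyRange_one_succ_right (by omega), List.foldl_append, List.foldl_cons, List.foldl_nil]
    set st := (PySem.List.pyRange 1 ((m : Int) + 1) 1).foldl (stepLB nums k) (List.replicate nums.length false, 0) with hst
    unfold stepLB
    have e1 : ((m : Int) + 1 - 1) = (m : Int) := by ring
    have e2 : ((m : Int) + 1) = ((m + 1 : Nat) : Int) := by push_cast; ring
    rw [e1, e2, PySem.List.pyGetD_natCast, PySem.List.pyGetD_natCast, hsnd]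
    have Ciff : (((m + 1 : Nat) : Int) = (nums.length : Int) ∨ nums.getD m 0 < nums.getD (m+1) 0)
        ↔ ((m + 1 : Nat) = nums.length ∨ nums.getD m 0 < nums.getD (m+1) 0) := by omega
    by_cases C : (m + 1 : Nat) = nums.length ∨ nums.getD m 0 < nums.getD (m+1) 0
    · rw [if_pos (Ciff.mpr C)]
      obtain ⟨slen, sget⟩ := setRange_spec ((((m+1 : Nat) : Int)) - max ((t : Int) + k - 1) (t : Int)).toNat
        (max ((t : Int) + k - 1) (t : Int)) ((m+1 : Nat) : Int) (by omega) rfl st.1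
      refine ⟨m + 1, le_rfl, rfl, by rw [slen, hlen], ?_, ?_, fun _ => rfl⟩
      · intro j
        rw [sget j, hmark j, hlen, ← Bool.decide_or, decide_eq_decide]
        by_cases hjt : t ≤ j ∧ j ≤ m
        · have hr := hrun hmN j hjt.1 hjt.2
          omega
        · omega
      · intro hlt j h1 h2
        have : j = m + 1 := by omega
        subst this
        have hC2 : nums.getD m 0 < nums.getD (m+1) 0 := by
          rcases C with h | h
          · omega
          · exact h
        rw [runL_succ, if_neg (by omega)]
        omega
    · rw [if_neg (fun h => C (Ciff.mp h))]
      push Not at C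
      refine ⟨t, by omega, hsnd, hlen, hmark, ?_, fun h => absurd (Or.inl h) (by tauto)⟩
      intro _ j h1 h2
      rcases Nat.lt_or_ge j (m + 1) with hj | hj
      · exact hrun hmN j h1 (by omega)
      · have : j = m + 1 := by omega
        subst this
        rw [runL_succ, if_pos (by omega)]
        have hr := hrun hmN m htle le_rfl
        omega
-- inside a maximal non-decreasing run ending (exclusively) at m+1, runR is the distance to the end
lemma runR_run (nums : List Int) (t m : Nat) (hm : m < nums.length)
    (hrun : ∀ j : Nat, t ≤ j → j + 1 ≤ m → nums.getD j 0 ≤ nums.getD (j+1) 0)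
    (hb : m + 1 = nums.length ∨ nums.getD (m+1) 0 < nums.getD m 0) :
    ∀ j : Nat, t ≤ j → j ≤ m → runR nums j = (m : Int) + 1 - j := by
  have key : ∀ d : Nat, ∀ j : Nat, t ≤ j → j ≤ m → m - j = d → runR nums j = (m : Int) + 1 - j := by
    intro d
    induction d with
    | zero =>
      intro j _ hjm hd
      have : j = m := by omega
      subst this
      by_cases hN : j + 1 < nums.length
      · rcases hb with h | h
        · omega
        · rw [runR_pos nums j hN, if_neg (by omega)]
          omega
      · rw [runR_last nums j hN]
        omega
    | succ d ihd =>
      intro j hjt hjm hd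
      have hjltm : j < m := by omega
      rw [runR_pos nums j (by omega), if_pos (hrun j hjt (by omega)),
        ihd (j+1) (by omega) (by omega) (by omega)]
      push_cast
      ring
  intro j h1 h2
  exact key (m - j) j h1 h2 rfl

-- B's second run loop: invariant over the processed prefix
lemma rightB_spec (nums : List Int) (k : Int) : ∀ (m : Nat), m ≤ nums.length →
    ∃ t : Nat, t ≤ m ∧
    (((PySem.List.pyRange 1 ((m : Int) + 1) 1).foldl (stepRB nums k) (List.replicate nums.length false, 0)).2 = (t : Int)) ∧
    (((PySem.List.pyRange 1 ((m : Int) + 1) 1).foldl (stepRB nums k) (List.replicate nums.length false, 0)).1.length = nums.length) ∧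
    (∀ j : Nat, ((PySem.List.pyRange 1 ((m : Int) + 1) 1).foldl (stepRB nums k) (List.replicate nums.length false, 0)).1.getD j false
       = decide (j < t ∧ k ≤ runR nums j)) ∧
    (∀ j : Nat, t ≤ j → j + 1 ≤ m → nums.getD j 0 ≤ nums.getD (j+1) 0) ∧
    (m = nums.length → t = m) := by
  intro m
  induction m with
  | zero =>
    intro _
    rw [show ((0 : Nat) : Int) + 1 = 1 by norm_num, PySem.List.pyRange_one_eq_nil (by omega)]
    refine ⟨0, le_rfl, rfl, by simp, ?_, fun j _ h => by omega, fun h => by omega⟩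
    intro j
    simp only [List.foldl_nil]
    have h1 : (List.replicate nums.length false).getD j false = false := by
      simp [List.getD, List.getElem?_replicate]
      split_ifs <;> rfl
    rw [h1]
    simp
  | succ m ih =>
    intro hm
    obtain ⟨t, htle, hsnd, hlen, hmark, hrunp, hfin⟩ := ih (by omega)
    have hmN : m < nums.length := by omega
    have hc1 : ((m + 1 : Nat) : Int) + 1 = ((m : Int) + 1) + 1 := by push_cast; ring
    rw [hc1, PySem.List.pyRange_one_succ_right (by omega), List.foldl_append, List.foldl_cons, List.foldl_nil]
    set st := (PySem.List.pyRange 1 ((m : Int) + 1) 1).foldl (stepRB nums k) (List.replicate nums.length false, 0) with hst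
    unfold stepRB
    have e1 : ((m : Int) + 1 - 1) = (m : Int) := by ring
    have e2 : ((m : Int) + 1) = ((m + 1 : Nat) : Int) := by push_cast; ring
    rw [e1, e2, PySem.List.pyGetD_natCast, PySem.List.pyGetD_natCast, hsnd]
    have Ciff : (((m + 1 : Nat) : Int) = (nums.length : Int) ∨ nums.getD (m+1) 0 < nums.getD m 0)
        ↔ ((m + 1 : Nat) = nums.length ∨ nums.getD (m+1) 0 < nums.getD m 0) := by omega
    by_cases C : (m + 1 : Nat) = nums.length ∨ nums.getD (m+1) 0 < nums.getD m 0
    · rw [if_pos (Ciff.mpr C)]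
      obtain ⟨slen, sget⟩ := setRange_spec ((min (((m+1 : Nat) : Int) - k + 1) ((m+1 : Nat) : Int)) - (t : Int)).toNat
        (t : Int) (min (((m+1 : Nat) : Int) - k + 1) ((m+1 : Nat) : Int)) (by omega) rfl st.1
      have hrr := runR_run nums t m hmN hrunp (by omega)
      refine ⟨m + 1, le_rfl, rfl, by rw [slen, hlen], ?_, fun j _ h => by omega, fun _ => rfl⟩
      intro j
      rw [sget j, hmark j, hlen, ← Bool.decide_or, decide_eq_decide]
      by_cases hjt : t ≤ j ∧ j ≤ m
      · have hr := hrr j hjt.1 hjt.2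
        omega
      · omega
    · rw [if_neg (fun h => C (Ciff.mp h))]
      push Not at C
      refine ⟨t, by omega, hsnd, hlen, hmark, ?_, fun h => absurd (Or.inl h) (by tauto)⟩
      intro j h1 h2
      rcases Nat.lt_or_ge (j + 1) (m + 1) with hj | hj
      · exact hrunp j h1 (by omega)
      · have : j = m := by omega
        subst this
        omega

lemma leftB_getD (nums : List Int) (k : Int) (j : Nat) (hj : j < nums.length) :
    (leftB nums k).getD j false = decide (k ≤ runL nums j) := by
  obtain ⟨t, _, _, _, hmark, _, hfin⟩ := leftB_spec nums k nums.length le_rfl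
  have ht : t = nums.length := hfin rfl
  rw [leftB, hmark j, decide_eq_decide]
  omega

lemma rightB_getD (nums : List Int) (k : Int) (j : Nat) (hj : j < nums.length) :
    (rightB nums k).getD j false = decide (k ≤ runR nums j) := by
  obtain ⟨t, _, _, _, hmark, _, hfin⟩ := rightB_spec nums k nums.length le_rfl
  have ht : t = nums.length := hfin rfl
  rw [rightB, hmark j, decide_eq_decide]
  omega

-- ===== VERDICT (by name: the statement is the Claim_ definition above) =====
theorem goodIndices_spec : Claim_equal_goodIndices := by
  intro nums k _
  unfold Spec_goodIndices
  rw [goodIndices_eq, goodIndices_alt_eq,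
    PySem.List.foldl_append_ite_eq_filter
      (fun i => PySem.List.pyGetD (leftA nums) (i - 1) 0 ≥ k ∧ PySem.List.pyGetD (rightA nums) (i + 1) 0 ≥ k),
    List.nil_append]
  apply List.filter_congr
  intro i hi
  rw [PySem.List.mem_pyRange_one] at hi
  obtain ⟨jl, hjl⟩ : ∃ jl : Nat, i - 1 = (jl : Int) := ⟨(i-1).toNat, by omega⟩
  obtain ⟨jr, hjr⟩ : ∃ jr : Nat, i + 1 = (jr : Int) := ⟨(i+1).toNat, by omega⟩
  have hjl2 : jl < nums.length := by omega
  have hjr2 : jr < nums.length := by omega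
  rw [hjl, hjr, PySem.List.pyGetD_natCast, PySem.List.pyGetD_natCast,
    PySem.List.pyGetD_natCast, PySem.List.pyGetD_natCast,
    leftA_getD nums jl hjl2, rightA_getD nums jr hjr2,
    leftB_getD nums k jl hjl2, rightB_getD nums k jr hjr2]
  simp [ge_iff_le]
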